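-- pv_equiv track=rewrite | github.com/NaifengLiu/Study-of-SpBFE | dev/strategy_generation.py | generate_non_adaptive
-- ===== SOURCE A (Python) =====
-- import itertools
--
-- def generate_non_adaptive(n):
--     all_path = list(itertools.permutations(list(range(n))))
--     all_strategies = []
--     for each in all_path:
--         ret = []
--         for i in range(n):
--             for _ in range(2**i):
--                 ret.append(each[i])
--         all_strategies.append(ret)
--     return all_strategies
-- ===== SOURCE B (Python) =====
-- def generate_non_adaptive(n):
--     def perms(xs):
--         if not xs:
--             return [[]]
--         return [[xs[i]] + rest
--                 for i in range(len(xs))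
--                 for rest in perms(xs[:i] + xs[i + 1:])]
--     out = []
--     for each in perms(list(range(n))):
--         acc = []
--         for x in each:
--             acc = acc + [x] * (len(acc) + 1)
--         out.append(acc)
--     return out
-- ===== Notes on version B (the rewrite author's own statement) =====
-- stated objective: alternative
-- what changed: B generates the permutations itself by recursive selection (pick index i, recurse on the remainder) instead of itertools.permutations, and builds each strategy with a length-doubling accumulator that appends each element len(acc)+1 times, instead of A's nested counting loop that appends a power-of-two number of copies, so no power is ever computed.
import Mathlib
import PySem

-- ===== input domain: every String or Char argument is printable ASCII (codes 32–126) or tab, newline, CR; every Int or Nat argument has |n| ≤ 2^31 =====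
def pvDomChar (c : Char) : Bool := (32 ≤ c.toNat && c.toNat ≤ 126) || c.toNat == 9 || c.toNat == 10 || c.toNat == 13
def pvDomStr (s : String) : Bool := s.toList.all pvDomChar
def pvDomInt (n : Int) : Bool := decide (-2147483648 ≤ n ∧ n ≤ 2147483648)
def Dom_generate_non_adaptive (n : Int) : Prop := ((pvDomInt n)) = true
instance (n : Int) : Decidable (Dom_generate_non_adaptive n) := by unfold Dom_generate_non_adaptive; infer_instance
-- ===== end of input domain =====

-- B generates permutations by recursive selection and builds each strategy with a
-- length-doubling accumulator instead of A's itertools + nested 2**i counting loop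
-- (objective: alternative decomposition, same cost).


-- ===== PORT A =====
-- 2**i is ported as 2 ^ i.toNat; exact since i ranges over range(n), hence 0 ≤ i.
def generate_non_adaptive (n : Int) : List (List Int) :=
  let all_path := PySem.List.permutations (PySem.List.pyRange 0 n) (PySem.List.pyRange 0 n).length
  all_path.foldl
    (fun all_strategies each =>
      let ret := (PySem.List.pyRange 0 n).foldl
        (fun ret i =>
          (PySem.List.pyRange 0 ((2 : Int) ^ i.toNat)).foldl
            (fun ret _ => ret ++ [PySem.List.pyGetD each i 0]) ret)
        []
      all_strategies ++ [ret])
    []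

-- ===== PORT B =====
-- B's recursive perms: xs[:i]+xs[i+1:] is xs.eraseIdx i; xs[i] is pyGetD (exact: 0 ≤ i < len);
-- .attach only carries the membership fact i < len for termination.
def pvBPerms (xs : List Int) : List (List Int) :=
  if xs = [] then [[]]
  else
    (List.range xs.length).attach.flatMap fun ⟨i, hi⟩ =>
      (pvBPerms (xs.eraseIdx i)).map fun rest => PySem.List.pyGetD xs (i : Int) 0 :: rest
termination_by xs.length
decreasing_by
  have : i < xs.length := List.mem_range.mp hi
  simp [List.length_eraseIdx, this]
  omega

-- acc = acc + [x] * (len(acc) + 1) each step; out collects one strategy per permutation.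
def generate_non_adaptive_alt (n : Int) : List (List Int) :=
  (pvBPerms (PySem.List.pyRange 0 n)).foldl
    (fun out each =>
      out ++ [each.foldl (fun acc x => acc ++ List.replicate (acc.length + 1) x) []])
    []

-- ===== PRECONDITION & SPEC =====
def Spec_generate_non_adaptive (n : Int) (out : List (List Int)) : Prop := out = generate_non_adaptive_alt n
instance (n : Int) (out : List (List Int)) : Decidable (Spec_generate_non_adaptive n out) := by unfold Spec_generate_non_adaptive; infer_instance

-- ===== CLAIM (what is proved, stated in full; the proofs are below) =====
def Claim_equal_generate_non_adaptive : Prop := ∀ (n : Int), Dom_generate_non_adaptive n → Spec_generate_non_adaptive n (generate_non_adaptive n)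

-- ===== LEMMAS AND PROOFS =====

theorem pv_flatMap_attach {α β : Type} (l : List α) (f : α → List β) :
    l.attach.flatMap (fun x => f x.1) = l.flatMap f := by simp [List.flatMap]

-- B's recursive selection perms coincide with PySem's itertools.permutations at full length
theorem pvBPerms_eq (xs : List Int) :
    pvBPerms xs = PySem.List.permutations xs xs.length := by
  induction hN : xs.length using Nat.strong_induction_on generalizing xs with
  | _ N ih =>
  cases xs with
  | nil => subst hN; simp [pvBPerms]
  | cons a t =>
    rw [pvBPerms]
    simp only [if_neg (by simp : (a :: t) ≠ [])]
    cases hN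
    rw [pv_flatMap_attach (List.range (a :: t).length)
        (fun i => (pvBPerms ((a :: t).eraseIdx i)).map
          fun rest => PySem.List.pyGetD (a :: t) (i : Int) 0 :: rest)]
    show _ = PySem.List.permutations (a :: t) (Nat.succ t.length)
    rw [PySem.List.permutations.eq_2]
    refine List.flatMap_congr (fun i hi => ?_)
    have hilt : i < t.length + 1 := by simpa using List.mem_range.mp hi
    have hget : (a :: t)[i]? = some ((a :: t).getD i 0) := by
      rw [List.getD_eq_getElem?_getD, List.getElem?_eq_getElem hilt]
      simp
    rw [hget]
    have hlen : ((a :: t).eraseIdx i).length = t.length := by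
      simp [List.length_eraseIdx, hilt]
    rw [PySem.List.pyGetD_natCast, ← hlen,
        ih ((a :: t).eraseIdx i).length (by rw [hlen, List.length_cons]; omega) _ rfl]

-- the accumulator-doubling fold, characterised by an explicit block expander
def pvExpand (m : Nat) : List Int → List Int
  | [] => []
  | x :: r => List.replicate (m + 1) x ++ pvExpand (2 * m + 1) r

theorem pv_foldl_expand (l : List Int) (acc : List Int) :
    l.foldl (fun acc x => acc ++ List.replicate (acc.length + 1) x) acc
      = acc ++ pvExpand acc.length l := by
  induction l generalizing acc with
  | nil => simp [pvExpand]
  | cons x r ih =>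
    simp only [List.foldl_cons, pvExpand, ih, List.length_append, List.length_replicate]
    rw [List.append_assoc, show acc.length + (acc.length + 1) = 2 * acc.length + 1 from by omega]

theorem pv_expand_pow (l : List Int) (k : Nat) :
    pvExpand (2 ^ k - 1) l
      = (List.range l.length).flatMap (fun j => List.replicate (2 ^ (k + j)) (l.getD j 0)) := by
  induction l generalizing k with
  | nil => simp [pvExpand]
  | cons x r ih =>
    have h1 : 0 < 2 ^ k := Nat.two_pow_pos _
    have hm1 : 2 ^ k - 1 + 1 = 2 ^ k := by omega
    have hm2 : 2 * (2 ^ k - 1) + 1 = 2 ^ (k + 1) - 1 := by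
      rw [pow_succ]; omega
    simp only [pvExpand, hm1, hm2, ih (k + 1)]
    rw [List.length_cons, List.range_succ_eq_map, List.flatMap_cons, List.flatMap_map]
    simp only [List.getD_cons_zero, List.getD_cons_succ, Nat.add_zero]
    congr 1
    refine List.flatMap_congr (fun j _ => ?_)
    have : k + 1 + j = k + Nat.succ j := by omega
    rw [this]

-- A's nested counting loops equal B's accumulator-doubling fold when each has length n.toNat
theorem pv_inner (n : Int) (each : List Int) (hlen : each.length = n.toNat) :
    (PySem.List.pyRange 0 n).foldl
        (fun ret i =>
          (PySem.List.pyRange 0 ((2 : Int) ^ i.toNat)).foldl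
            (fun ret _ => ret ++ [PySem.List.pyGetD each i 0]) ret)
        []
      = each.foldl (fun acc x => acc ++ List.replicate (acc.length + 1) x) [] := by
  have hconst : ∀ (i : Int) (ret : List Int),
      (PySem.List.pyRange 0 ((2 : Int) ^ i.toNat)).foldl
          (fun ret _ => ret ++ [PySem.List.pyGetD each i 0]) ret
        = ret ++ List.replicate (2 ^ i.toNat) (PySem.List.pyGetD each i 0) := by
    intro i ret
    rw [show (fun (ret : List Int) (_ : Int) => ret ++ [PySem.List.pyGetD each i 0])
          = (fun ret x => ret ++ [(fun _ => PySem.List.pyGetD each i 0) x]) from rfl,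
        PySem.List.foldl_append_singleton_eq_map]
    congr 1
    rw [PySem.List.pyRange_one, List.map_map]
    show List.map (fun _ => PySem.List.pyGetD each i 0) _ = _
    rw [List.map_const', List.length_range]
    have h2 : ((2 : Int) ^ i.toNat - 0) = ((2 ^ i.toNat : Nat) : Int) := by push_cast; ring
    rw [h2, Int.toNat_natCast]
  simp only [hconst]
  rw [show (fun (ret : List Int) (i : Int) =>
        ret ++ List.replicate (2 ^ i.toNat) (PySem.List.pyGetD each i 0))
      = (fun ret i => ret ++ (fun i => List.replicate (2 ^ i.toNat) (PySem.List.pyGetD each i 0)) i)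
      from rfl, PySem.List.foldl_append_eq_flatMap, List.nil_append]
  rw [PySem.List.pyRange_one 0 n]
  simp only [List.flatMap_map, zero_add, Int.toNat_natCast]
  have hsub : (n - 0).toNat = n.toNat := by omega
  rw [hsub, pv_foldl_expand, List.nil_append]
  rw [show (List.length ([] : List Int)) = 2 ^ 0 - 1 from rfl, pv_expand_pow, hlen]
  refine List.flatMap_congr (fun j hj => ?_)
  have hjlt : j < n.toNat := List.mem_range.mp hj
  rw [PySem.List.pyGetD_natCast]
  simp

-- every itertools permutation of xs has xs's length
theorem pv_mem_len (xs p : List Int)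
    (hp : p ∈ PySem.List.permutations xs xs.length) : p.length = xs.length :=
  (PySem.List.perm_of_mem_permutations hp).length_eq

-- ===== VERDICT (by name: the statement is the Claim_ definition above) =====
theorem generate_non_adaptive_spec : Claim_equal_generate_non_adaptive := by
  intro n _
  unfold Spec_generate_non_adaptive generate_non_adaptive generate_non_adaptive_alt
  rw [pvBPerms_eq]
  rw [show (fun (all_strategies : List (List Int)) (each : List Int) =>
        all_strategies ++ [(PySem.List.pyRange 0 n).foldl
          (fun ret i => (PySem.List.pyRange 0 ((2 : Int) ^ i.toNat)).foldl
            (fun ret _ => ret ++ [PySem.List.pyGetD each i 0]) ret) []])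
      = (fun all_strategies each => all_strategies ++ [(fun each =>
          (PySem.List.pyRange 0 n).foldl
          (fun ret i => (PySem.List.pyRange 0 ((2 : Int) ^ i.toNat)).foldl
            (fun ret _ => ret ++ [PySem.List.pyGetD each i 0]) ret) []) each]) from rfl,
    PySem.List.foldl_append_singleton_eq_map, List.nil_append]
  rw [show (fun (out : List (List Int)) (each : List Int) =>
        out ++ [each.foldl (fun acc x => acc ++ List.replicate (acc.length + 1) x) []])
      = (fun out each => out ++ [(fun each =>
          each.foldl (fun acc x => acc ++ List.replicate (acc.length + 1) x) []) each]) from rfl,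
    PySem.List.foldl_append_singleton_eq_map, List.nil_append]
  refine List.map_congr_left (fun each hmem => ?_)
  have hlen : each.length = n.toNat := by
    have := pv_mem_len _ _ hmem
    rw [this, PySem.List.pyRange_one]
    simp
  exact pv_inner n each hlen
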